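-- pv_equiv track=rewrite | github.com/douglasbolis/tokenizador | old/lib_ProcessamentoDeDados.py | uniao
-- ===== SOURCE A (Python) =====
-- def separaPal(texto):
-- 	separadores = '-/\|_+={}[]@#$%*().!?:;, ' ; palavras = [] ; i = ''
-- 	palavra = ''
--
-- 	texto = texto+'.' #Caso o usuário nao digite um ponto final, coloco este ponto final para saber onde termina a ultima palvra.
--
--
-- 	for i in texto: #i recebera cada caracter do texto digitado.
--
-- 		if i not in separadores: # confere se o caracter i está contido na string que contem os separadores.
-- 			palavra = palavra+i
--
-- 		else:
-- 			if len(palavra)>=1: # Isso evita que ele adicione a lista de palavras uma string vazia.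
-- 				palavras.append(palavra)
-- 			palavra = ''
--
--
-- 	return palavras
--
-- def eliminaPR(t1):
-- 	listaPalavras = [] ; palavras = [] ; i = 0
--
-- 	palavras = separaPal(t1)
--
-- 	for i in range(len(palavras)):
-- 		if palavras[i] not in listaPalavras:
-- 			listaPalavras.append(palavras[i])
--
--
--
--
-- 	return listaPalavras
--
-- def uniao(txt1,txt2):
-- 	cjUniao = [] ; t1 = [] ; t2 = [] ; palavra = ''
--
-- 	t1 = eliminaPR(txt1)
-- 	t2 = eliminaPR(txt2)
--
-- 	for palavra in t1:
-- 		cjUniao.append(palavra)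
--
-- 	for palavra in t2:
-- 		if palavra not in cjUniao:
-- 			cjUniao.append(palavra)
--
-- 	return cjUniao
-- ===== SOURCE B (Python) =====
-- SEPS = '-/\\|_+={}[]@#$%*().!?:;, '
--
-- def uniao(txt1, txt2):
--     tbl = str.maketrans(dict.fromkeys(SEPS, ' '))
--     words = (txt1.translate(tbl) + ' ' + txt2.translate(tbl)).split(' ')
--     return list(dict.fromkeys(w for w in words if w))
-- ===== Notes on version B (the rewrite author's own statement) =====
-- stated objective: idiomatic
-- what changed: Replaced A's char-by-char state machine with its '.' sentinel and three list-membership dedup loops by translating all separators to spaces, splitting the joined texts once, and one ordered dict.fromkeys dedup over the concatenated word list.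
import Mathlib
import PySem

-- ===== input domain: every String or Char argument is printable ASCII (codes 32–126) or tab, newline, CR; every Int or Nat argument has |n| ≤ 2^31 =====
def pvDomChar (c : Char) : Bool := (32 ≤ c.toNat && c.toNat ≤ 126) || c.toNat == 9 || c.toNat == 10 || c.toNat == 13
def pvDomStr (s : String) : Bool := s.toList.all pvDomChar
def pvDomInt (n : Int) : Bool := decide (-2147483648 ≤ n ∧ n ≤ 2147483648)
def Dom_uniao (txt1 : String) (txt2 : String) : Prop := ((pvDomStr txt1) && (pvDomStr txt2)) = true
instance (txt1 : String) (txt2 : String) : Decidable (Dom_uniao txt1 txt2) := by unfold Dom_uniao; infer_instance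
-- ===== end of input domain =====

-- B replaces A's char-by-char state machine and its three membership-test dedup loops by a
-- translate-separators-to-space tokenization with a single split and one ordered dict.fromkeys
-- dedup over the concatenated word lists (idiomatic; measured faster in a timing run).

-- ===== PORT A =====
-- A's separator string, as its list of characters
def pvSeps : List Char := "-/\\|_+={}[]@#$%*().!?:;, ".toList

-- body of A's `for i in texto` loop; the word accumulator `palavra` (a Python str built by +)
-- is carried as a List Char and turned into a String exactly when A appends it to `palavras`
def separaPalStep (st : List String × List Char) (i : Char) : List String × List Char :=
  if i ∉ pvSeps then (st.1, st.2 ++ [i])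
  else if st.2.length ≥ 1 then (st.1 ++ [String.mk st.2], [])
  else (st.1, [])

def separaPal (texto : String) : List String :=
  -- texto = texto + '.'
  ((texto.toList ++ ['.']).foldl separaPalStep ([], [])).1

def eliminaPR (t1 : String) : List String :=
  let palavras := separaPal t1
  (PySem.List.pyRange 0 (PySem.List.len palavras)).foldl
    (fun listaPalavras i =>
      if PySem.List.pyGetD palavras i "" ∉ listaPalavras then
        listaPalavras ++ [PySem.List.pyGetD palavras i ""]
      else listaPalavras) []

def uniao (txt1 : String) (txt2 : String) : List String :=
  let t1 := eliminaPR txt1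
  let t2 := eliminaPR txt2
  let cjUniao := t1.foldl (fun cjUniao palavra => cjUniao ++ [palavra]) []
  t2.foldl (fun cjUniao palavra =>
    if palavra ∉ cjUniao then cjUniao ++ [palavra] else cjUniao) cjUniao

-- ===== PORT B =====
-- txt.translate(tbl) with a table sending every separator to ' ': character-wise map (exact)
def pvTr (c : Char) : Char := if c ∈ pvSeps then ' ' else c

def uniao_alt (txt1 : String) (txt2 : String) : List String :=
  let words := PySem.Chars.splitOn
    (txt1.toList.map pvTr ++ ' ' :: txt2.toList.map pvTr) [' ']
  PySem.List.dedup ((words.filter (· ≠ [])).map String.mk)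

-- ===== PRECONDITION & SPEC =====
def Spec_uniao (txt1 : String) (txt2 : String) (out : List String) : Prop := out = uniao_alt txt1 txt2
instance (txt1 : String) (txt2 : String) (out : List String) : Decidable (Spec_uniao txt1 txt2 out) := by unfold Spec_uniao; infer_instance

-- ===== CLAIM (what is proved, stated in full; the proofs are below) =====
def Claim_equal_uniao : Prop := ∀ (txt1 : String) (txt2 : String), Dom_uniao txt1 txt2 → Spec_uniao txt1 txt2 (uniao txt1 txt2)

-- ===== LEMMAS AND PROOFS =====

-- canonical tokenizer: the pvSeps-separated words of the input, current word `cur`, trailing word flushed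
def pvW (cur : List Char) : List Char → List (List Char)
  | [] => if cur = [] then [] else [cur]
  | c :: t => if c ∈ pvSeps then (if cur = [] then pvW [] t else cur :: pvW [] t)
              else pvW (cur ++ [c]) t

-- space-only variant (what B's split computes after the translation)
def pvWs (cur : List Char) : List Char → List (List Char)
  | [] => if cur = [] then [] else [cur]
  | c :: t => if c = ' ' then (if cur = [] then pvWs [] t else cur :: pvWs [] t)
              else pvWs (cur ++ [c]) t

-- split-with-empties, mirroring PySem.Chars.splitOn.go's state (current piece reversed)
def pvRaw (cur : List Char) : List Char → List (List Char)
  | [] => [cur.reverse]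
  | c :: t => if c = ' ' then cur.reverse :: pvRaw [] t else pvRaw (c :: cur) t

-- A's separaPal loop computes the canonical tokenizer
theorem pvLoopA (l : List Char) (ws : List String) (cur : List Char) :
    ((l ++ ['.']).foldl separaPalStep (ws, cur)).1
      = ws ++ (pvW cur l).map String.mk := by
  induction l generalizing ws cur with
  | nil =>
      simp only [List.nil_append, List.foldl_cons, List.foldl_nil, separaPalStep, pvW]
      have hdot : ('.' : Char) ∈ pvSeps := by decide
      simp only [hdot, not_true_eq_false, if_false]
      rcases eq_or_ne cur [] with h | h
      · simp [h]
      · have : cur.length ≥ 1 := by cases cur <;> simp_all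
        simp [h, this]
  | cons c t ih =>
      by_cases hc : c ∈ pvSeps
      · have hstep : separaPalStep (ws, cur) c
            = (if cur.length ≥ 1 then ws ++ [String.mk cur] else ws, []) := by
          simp [separaPalStep, hc]
          split <;> rfl
        simp only [List.cons_append, List.foldl_cons, hstep]
        rw [ih]
        rcases eq_or_ne cur [] with h | h
        · simp [pvW, hc, h]
        · have : cur.length ≥ 1 := by cases cur <;> simp_all
          simp [pvW, hc, h, this]
      · have hstep : separaPalStep (ws, cur) c = (ws, cur ++ [c]) := by
          simp [separaPalStep, hc]
        simp only [List.cons_append, List.foldl_cons, hstep]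
        rw [ih]
        simp [pvW, hc]

-- B's split of the translated text, related to pvRaw
theorem pvGoEq (fuel : Nat) : ∀ (l cur : List Char) (accs : List (List Char)),
    l.length < fuel →
    PySem.Chars.splitOn.go [' '] fuel l cur accs
      = accs.reverse ++ pvRaw cur l := by
  induction fuel with
  | zero => intro l cur accs h; omega
  | succ n ih =>
      intro l cur accs h
      cases l with
      | nil => simp [PySem.Chars.splitOn.go, pvRaw]
      | cons c t =>
          by_cases hc : c = ' '
          · subst hc
            rw [PySem.Chars.splitOn.go]
            have hp : [' '].isPrefixOf (' ' :: t) = true := by simp [List.isPrefixOf]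
            simp only [hp, if_true, List.length_cons, List.drop_succ_cons, List.length_nil,
              List.drop_zero]
            rw [ih t [] (cur.reverse :: accs) (by simpa using Nat.lt_of_succ_lt_succ h)]
            simp [pvRaw]
          · rw [PySem.Chars.splitOn.go]
            have hp : [' '].isPrefixOf (c :: t) = false := by
              simp [List.isPrefixOf]; intro hh; exact absurd hh.symm hc
            simp only [hp, Bool.false_eq_true, if_false]
            rw [ih t (c :: cur) accs (by simpa using Nat.lt_of_succ_lt_succ h)]
            simp [pvRaw, hc]

-- dropping the empty pieces of the raw split gives the space tokenizer
theorem pvRawFilter (l : List Char) : ∀ cur : List Char,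
    (pvRaw cur l).filter (· ≠ []) = pvWs cur.reverse l := by
  induction l with
  | nil =>
      intro cur
      simp only [pvRaw, pvWs, List.filter]
      rcases eq_or_ne cur.reverse [] with h | h <;> simp [h]
  | cons c t ih =>
      intro cur
      by_cases hc : c = ' '
      · subst hc
        simp only [pvRaw, pvWs, if_true, List.filter_cons]
        have h0 := ih []
        simp only [List.reverse_nil, ne_eq, decide_not] at h0
        rcases eq_or_ne cur.reverse [] with h | h <;> simp [h, h0]
      · simp only [pvRaw, pvWs, hc, if_false]
        rw [ih (c :: cur)]
        simp

-- the space tokenizer splits at the glue space B inserts between the two texts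
theorem pvWsSplit (x : List Char) : ∀ (cur y : List Char),
    pvWs cur (x ++ ' ' :: y) = pvWs cur x ++ pvWs [] y := by
  induction x with
  | nil => intro cur y; rcases eq_or_ne cur [] with h | h <;> simp [pvWs, h]
  | cons c t ih =>
      intro cur y
      by_cases hc : c = ' '
      · subst hc
        rcases eq_or_ne cur [] with h | h <;> simp [pvWs, h, ih]
      · simp [pvWs, hc, ih]

-- translating separators to spaces turns the canonical tokenizer into the space tokenizer
theorem pvWsTr (l : List Char) : ∀ cur : List Char,
    pvWs cur (l.map pvTr) = pvW cur l := by
  induction l with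
  | nil => intro cur; simp [pvWs, pvW]
  | cons c t ih =>
      intro cur
      by_cases hc : c ∈ pvSeps
      · have : pvTr c = ' ' := by simp [pvTr, hc]
        simp [pvWs, pvW, this, hc, ih]
      · have h1 : pvTr c = c := by simp [pvTr, hc]
        have h2 : c ≠ ' ' := fun h => hc (h ▸ (by decide : (' ' : Char) ∈ pvSeps))
        simp [pvWs, pvW, h1, h2, hc, ih]

-- A's `if w not in acc: acc.append(w)` step is PySem.Set.add
theorem pvStepAdd (acc : List String) (w : String) :
    (if w ∉ acc then acc ++ [w] else acc) = PySem.Set.add acc w := by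
  simp only [PySem.Set.add, ite_not]
  rcases em (w ∈ acc) with h | h <;> simp [h]

-- folding Set.add over an already-deduplicated list adds the same elements
theorem pvUpdateOfList (w : List String) : ∀ s : PySem.Set String,
    PySem.Set.update s (PySem.Set.ofList w) = PySem.Set.update s w := by
  have key : ∀ (w : List String) (s c : PySem.Set String),
      PySem.Set.update s (PySem.Set.update c w) = PySem.Set.update (PySem.Set.update s c) w := by
    intro w
    induction w with
    | nil => intro s c; rfl
    | cons x t ih =>
        intro s c
        show PySem.Set.update s (PySem.Set.update (PySem.Set.add c x) t)
          = PySem.Set.update (PySem.Set.add (PySem.Set.update s c) x) t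
        rw [ih]
        congr 1
        by_cases hx : x ∈ c
        · have h1 : PySem.Set.add c x = c := by
            simp [PySem.Set.add, List.contains_eq_mem, hx]
          have h2 : PySem.Set.add (PySem.Set.update s c) x = PySem.Set.update s c := by
            simp [PySem.Set.add, List.contains_eq_mem,
              (PySem.Set.mem_update s c x).mpr (Or.inr hx)]
          rw [h1, h2]
        · have h1 : PySem.Set.add c x = c ++ [x] := by
            simp [PySem.Set.add, List.contains_eq_mem, hx]
          rw [h1]
          show PySem.Set.update s (c ++ [x]) = _
          simp only [PySem.Set.update, List.foldl_append, List.foldl_cons, List.foldl_nil]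
  intro s
  have := key w s []
  simpa [PySem.Set.ofList, PySem.Set.update, PySem.Set.empty] using this

theorem pvSeparaPal (txt : String) :
    separaPal txt = (pvW [] txt.toList).map String.mk := by
  show ((txt.toList ++ ['.']).foldl separaPalStep ([], [])).1 = _
  rw [pvLoopA]
  simp

theorem pvEliminaPR (txt : String) :
    eliminaPR txt = PySem.Set.ofList (separaPal txt) := by
  show (PySem.List.pyRange 0 (PySem.List.len (separaPal txt))).foldl
      (fun listaPalavras i =>
        if PySem.List.pyGetD (separaPal txt) i "" ∉ listaPalavras then
          listaPalavras ++ [PySem.List.pyGetD (separaPal txt) i ""]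
        else listaPalavras) [] = _
  rw [PySem.List.foldl_pyRange_pyGetD (separaPal txt) ""
    (fun acc w => if w ∉ acc then acc ++ [w] else acc) [] (le_refl 0)]
  simp only [Int.toNat_zero, List.drop_zero]
  have hf : (fun (acc : List String) (w : String) => if w ∉ acc then acc ++ [w] else acc)
      = PySem.Set.add := funext fun a => funext fun w => pvStepAdd a w
  rw [hf]
  rfl

-- ===== VERDICT (by name: the statement is the Claim_ definition above) =====
theorem uniao_spec : Claim_equal_uniao := by
  intro txt1 txt2 _
  show uniao txt1 txt2 = uniao_alt txt1 txt2
  -- A's side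
  have hA : uniao txt1 txt2
      = PySem.Set.update (PySem.Set.ofList (separaPal txt1)) (PySem.Set.ofList (separaPal txt2)) := by
    show (eliminaPR txt2).foldl
        (fun cjUniao palavra => if palavra ∉ cjUniao then cjUniao ++ [palavra] else cjUniao)
        ((eliminaPR txt1).foldl (fun cjUniao palavra => cjUniao ++ [palavra]) []) = _
    rw [PySem.List.foldl_append_singleton, List.nil_append]
    have hf : (fun (acc : List String) (w : String) => if w ∉ acc then acc ++ [w] else acc)
        = PySem.Set.add := funext fun a => funext fun w => pvStepAdd a w
    rw [hf, pvEliminaPR, pvEliminaPR]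
    rfl
  -- B's side
  have hB : uniao_alt txt1 txt2
      = PySem.List.dedup ((pvW [] txt1.toList).map String.mk ++ (pvW [] txt2.toList).map String.mk) := by
    show PySem.List.dedup (((PySem.Chars.splitOn
        (txt1.toList.map pvTr ++ ' ' :: txt2.toList.map pvTr) [' ']).filter (· ≠ [])).map String.mk) = _
    have hlen : (txt1.toList.map pvTr ++ ' ' :: txt2.toList.map pvTr).length
        < (txt1.toList.map pvTr ++ ' ' :: txt2.toList.map pvTr).length + 1 := Nat.lt_succ_self _
    rw [show PySem.Chars.splitOn (txt1.toList.map pvTr ++ ' ' :: txt2.toList.map pvTr) [' ']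
        = PySem.Chars.splitOn.go [' ']
            ((txt1.toList.map pvTr ++ ' ' :: txt2.toList.map pvTr).length + 1)
            (txt1.toList.map pvTr ++ ' ' :: txt2.toList.map pvTr) [] [] from rfl,
      pvGoEq _ _ _ _ hlen]
    simp only [List.reverse_nil, List.nil_append]
    rw [pvRawFilter]
    simp only [List.reverse_nil]
    rw [pvWsSplit, pvWsTr, pvWsTr, List.map_append]
  rw [hA, hB]
  rw [pvUpdateOfList]
  show _ = PySem.Set.ofList (_ ++ _)
  simp only [PySem.Set.ofList, PySem.Set.update, List.foldl_append]
  rw [pvSeparaPal, pvSeparaPal]
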